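-- pv_equiv track=rewrite | github.com/CrudeOhio/hledger-add-tx | hledger-add-tx.py | build_leaf_account_map
-- ===== SOURCE A (Python) =====
-- def build_leaf_account_map(accounts):
--     leaf_map = {}
--     duplicates = set()
--     for acct in accounts:
--         leaf = acct.split(':')[-1].strip()
--         if not leaf:
--             continue
--         if leaf in leaf_map and leaf_map[leaf] != acct:
--             duplicates.add(leaf)
--         else:
--             leaf_map[leaf] = acct
--     for d in duplicates:
--         leaf_map.pop(d, None)
--     return leaf_map, sorted(duplicates)
-- ===== SOURCE B (Python) =====
-- def build_leaf_account_map(accounts):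
--     # Pass 1: group the distinct full accounts seen for each non-empty leaf.
--     groups = {}
--     for acct in accounts:
--         leaf = acct.split(':')[-1].strip()
--         if leaf:
--             vals = groups.setdefault(leaf, [])
--             if acct not in vals:
--                 vals.append(acct)
--     # Pass 2: classify each leaf: unique -> mapped, ambiguous -> duplicate.
--     leaf_map = {}
--     dups = []
--     for leaf, vals in groups.items():
--         if len(vals) == 1:
--             leaf_map[leaf] = vals[0]
--         else:
--             dups.append(leaf)
--     return leaf_map, sorted(dups)
-- ===== Notes on version B (the rewrite author's own statement) =====
-- stated objective: alternative
-- what changed: Replaces A's single incremental pass that mutates leaf_map and then deletes detected duplicates with an index-then-classify structure: first build a grouping dict leaf -> distinct full accounts, then classify each leaf as unique (kept with its one account) or duplicate.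
import Mathlib
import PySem

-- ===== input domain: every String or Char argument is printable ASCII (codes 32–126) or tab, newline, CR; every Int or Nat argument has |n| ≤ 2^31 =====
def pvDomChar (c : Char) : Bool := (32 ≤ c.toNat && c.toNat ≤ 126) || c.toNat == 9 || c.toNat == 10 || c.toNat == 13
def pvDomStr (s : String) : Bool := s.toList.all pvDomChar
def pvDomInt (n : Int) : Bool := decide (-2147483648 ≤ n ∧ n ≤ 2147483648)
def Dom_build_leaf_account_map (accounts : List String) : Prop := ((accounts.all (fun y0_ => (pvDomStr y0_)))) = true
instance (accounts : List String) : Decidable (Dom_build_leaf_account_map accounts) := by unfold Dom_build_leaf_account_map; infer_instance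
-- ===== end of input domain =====

-- B is an alternative decomposition (index-then-classify instead of A's incremental pass with
-- a deletion cleanup); same cost, proved to return the same value on every input.

-- shared sub-expression of both Pythons: acct.split(':')[-1].strip()
-- (sep ':' ≠ '' so split? is some, and never the empty list: the [-1] never raises; both getD are unreachable)
def pvLeaf (acct : String) : String :=
  PySem.Str.strip ((PySem.List.pyGet? ((PySem.Str.split? acct ":").getD []) (-1)).getD "")

-- ===== PORT A =====
-- one incremental pass: store first account per leaf, record clashes, then pop the clashes
def pvStepA (st : PySem.Dict String String × PySem.Set String) (acct : String) :
    PySem.Dict String String × PySem.Set String :=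
  let leaf := pvLeaf acct
  if leaf = "" then st
  else if st.1.contains leaf && !(st.1.getD leaf "" == acct) then
    (st.1, PySem.Set.add st.2 leaf)
  else
    (st.1.insert leaf acct, st.2)

def build_leaf_account_map (accounts : List String) : (List (String × String)) × List String :=
  let st := accounts.foldl pvStepA (PySem.Dict.empty, PySem.Set.empty)
  -- for d in duplicates: leaf_map.pop(d, None)  (result independent of the set's order)
  let m := st.2.foldl (fun m k => m.erase k) st.1
  (m.items, PySem.List.sorted st.2 (fun x => x) false)

-- ===== PORT B =====
-- pass 1: group the distinct full accounts per non-empty leaf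
def pvStepB (g : PySem.Dict String (List String)) (acct : String) :
    PySem.Dict String (List String) :=
  let leaf := pvLeaf acct
  if leaf = "" then g
  else
    let vals := g.getD leaf []
    if acct ∈ vals then g else g.insert leaf (vals ++ [acct])

-- pass 2: classify each leaf
def pvClassify (st : PySem.Dict String String × List String) (p : String × List String) :
    PySem.Dict String String × List String :=
  if p.2.length == 1 then (st.1.insert p.1 ((PySem.List.pyGet? p.2 0).getD ""), st.2)
  else (st.1, st.2 ++ [p.1])

def build_leaf_account_map_alt (accounts : List String) : (List (String × String)) × List String :=
  let g := accounts.foldl pvStepB PySem.Dict.empty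
  let st := g.items.foldl pvClassify (PySem.Dict.empty, [])
  (st.1.items, PySem.List.sorted st.2 (fun x => x) false)

-- ===== PRECONDITION & SPEC =====
def Spec_build_leaf_account_map (accounts : List String) (out : (List (String × String)) × List String) : Prop := out = build_leaf_account_map_alt accounts
instance (accounts : List String) (out : (List (String × String)) × List String) : Decidable (Spec_build_leaf_account_map accounts out) := by unfold Spec_build_leaf_account_map; infer_instance

-- ===== CLAIM (what is proved, stated in full; the proofs are below) =====
def Claim_equal_build_leaf_account_map : Prop := ∀ (accounts : List String), Dom_build_leaf_account_map accounts → Spec_build_leaf_account_map accounts (build_leaf_account_map accounts)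

-- ===== LEMMAS AND PROOFS =====

def pvInv (m : PySem.Dict String String) (d : PySem.Set String)
    (g : PySem.Dict String (List String)) : Prop :=
  m.items = g.items.map (fun p => (p.1, p.2.headD "")) ∧
  (∀ p ∈ g.items, p.2 ≠ []) ∧
  g.keys.Nodup ∧
  d.Nodup ∧
  (∀ k, k ∈ d ↔ ∃ vs, (k, vs) ∈ g.items ∧ 2 ≤ vs.length)

theorem pv_two_le {vs : List String} {a b : String} (ha : a ∈ vs) (hb : b ∈ vs)
    (hne : a ≠ b) : 2 ≤ vs.length := by
  rcases vs with _ | ⟨x, _ | ⟨y, t⟩⟩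
  · simp at ha
  · simp only [List.mem_singleton] at ha hb
    subst ha; subst hb
    exact absurd rfl hne
  · simp only [List.length_cons]; omega

theorem pv_headD_mem {vs : List String} (h : vs ≠ []) : vs.headD "" ∈ vs := by
  cases vs with | nil => simp at h | cons b t => simp

theorem pv_headD_append {vs : List String} (h : vs ≠ []) (a : String) :
    (vs ++ [a]).headD "" = vs.headD "" := by
  cases vs with | nil => simp at h | cons b t => simp

-- m and g have the same keys, hence the same `contains`
theorem pv_keys_eq {m : PySem.Dict String String} {g : PySem.Dict String (List String)}
    (him : m.items = g.items.map (fun p => (p.1, p.2.headD ""))) : m.keys = g.keys := by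
  simp only [PySem.Dict.keys, him, List.map_map]
  rfl

theorem pv_contains_eq {m : PySem.Dict String String} {g : PySem.Dict String (List String)}
    (him : m.items = g.items.map (fun p => (p.1, p.2.headD ""))) (k : String) :
    m.contains k = g.contains k := by
  simp only [PySem.Dict.contains, him, List.any_map]
  rfl

set_option maxHeartbeats 1000000 in
theorem pvInv_step (m d g acct) (h : pvInv m d g) :
    pvInv (pvStepA (m, d) acct).1 (pvStepA (m, d) acct).2 (pvStepB g acct) := by
  obtain ⟨him, hnev, hnd, hdnd, hmem⟩ := h
  have hndm : m.keys.Nodup := (pv_keys_eq him) ▸ hnd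
  unfold pvStepA pvStepB
  set leaf := pvLeaf acct with hleafdef
  by_cases hleaf : leaf = ""
  · simp only [if_pos hleaf]
    exact ⟨him, hnev, hnd, hdnd, hmem⟩
  · simp only [if_neg hleaf]
    by_cases hc : g.contains leaf = true
    · -- leaf already grouped
      obtain ⟨vs, hgvs⟩ : ∃ vs, g.get? leaf = some vs := by
        rw [PySem.Dict.contains_eq_isSome_get?] at hc
        exact Option.isSome_iff_exists.1 hc
      have hpm : (leaf, vs) ∈ g.items := PySem.Dict.mem_items_of_get?_eq_some g hgvs
      have hvs : vs ≠ [] := hnev _ hpm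
      have hmitem : (leaf, vs.headD "") ∈ m.items := by
        rw [him]; exact List.mem_map.2 ⟨(leaf, vs), hpm, rfl⟩
      have hmg : m.get? leaf = some (vs.headD "") :=
        PySem.Dict.get?_of_mem_items m hmitem hndm
      have hgd : g.getD leaf [] = vs := PySem.Dict.getD_of_get?_eq_some g [] hgvs
      have hmc : m.contains leaf = true := (pv_contains_eq him leaf).trans hc
      have hmgd : m.getD leaf "" = vs.headD "" := PySem.Dict.getD_of_get?_eq_some m "" hmg
      rw [hgd]
      by_cases hhead : vs.headD "" = acct
      · -- same first account again: both sides unchanged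
        have hin : acct ∈ vs := hhead ▸ pv_headD_mem hvs
        have hmins : m.insert leaf acct = m := by
          apply PySem.Dict.ext
          rw [PySem.Dict.items_insert_of_contains m acct hmc]
          have : ∀ p ∈ m.items, (if p.1 == leaf then (leaf, acct) else p) = p := by
            intro p hp
            by_cases hpk : p.1 = leaf
            · have h1 : m.get? p.1 = some p.2 := PySem.Dict.get?_of_mem_items m hp hndm
              rw [hpk, hmg] at h1
              simp only [hpk, beq_self_eq_true, if_pos]
              have : p.2 = acct := by rw [← hhead]; exact (Option.some.injEq _ _ ▸ h1).symm
              exact Prod.ext (by simp [hpk]) (by simp [this])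
            · simp [hpk]
          calc m.items.map _ = m.items.map id := List.map_congr_left (by simpa using this)
            _ = m.items := List.map_id _
        have hcond : (m.contains leaf && !(m.getD leaf "" == acct)) = false := by
          rw [hmc, hmgd, hhead]; simp
        rw [if_pos hin, hcond]
        simp only [Bool.false_eq_true, if_false]
        rw [hmins]
        exact ⟨him, hnev, hnd, hdnd, hmem⟩
      · -- a different account for an existing leaf: A records a duplicate
        have hcond : (m.contains leaf && !(m.getD leaf "" == acct)) = true := by
          rw [hmc, hmgd]; simpa using hhead
        rw [hcond]
        simp only [if_true]
        by_cases hin : acct ∈ vs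
        · rw [if_pos hin]
          refine ⟨him, hnev, hnd, PySem.Set.nodup_add d leaf hdnd, ?_⟩
          intro k
          rw [PySem.Set.mem_add]
          constructor
          · rintro (hk | rfl)
            · exact (hmem k).1 hk
            · exact ⟨vs, hpm, pv_two_le (pv_headD_mem hvs) hin hhead⟩
          · intro hx; exact Or.inl ((hmem k).2 hx)
        · rw [if_neg hin]
          have hg' := PySem.Dict.items_insert_of_contains g (vs ++ [acct]) hc
          refine ⟨?_, ?_, ?_, PySem.Set.nodup_add d leaf hdnd, ?_⟩
          · rw [hg', List.map_map, him]
            apply List.map_congr_left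
            intro p hp
            by_cases hpk : p.1 = leaf
            · have h2 := PySem.Dict.get?_of_mem_items g hp hnd
              rw [hpk, hgvs] at h2
              have hv : p.2 = vs := (Option.some.inj h2).symm
              simp only [Function.comp_apply, hpk, hv, beq_self_eq_true, if_true]
              rw [pv_headD_append hvs]
            · simp [Function.comp, hpk]
          · intro p hp; rw [hg'] at hp
            obtain ⟨q, hq, rfl⟩ := List.mem_map.1 hp
            by_cases hqk : q.1 = leaf
            · simp [hqk]
            · simp only [hqk, beq_iff_eq, if_false]
              exact hnev q hq
          · rw [PySem.Dict.keys_insert_of_contains g (vs ++ [acct]) hc]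
            exact hnd
          · intro k
            rw [PySem.Set.mem_add, hg']
            constructor
            · rintro (hk | rfl)
              · obtain ⟨vs', hvs', h2⟩ := (hmem k).1 hk
                by_cases hkl : k = leaf
                · subst hkl
                  have h3 := PySem.Dict.get?_of_mem_items g hvs' hnd
                  rw [hgvs] at h3
                  have hv : vs' = vs := Option.some.inj h3.symm
                  refine ⟨vs ++ [acct], List.mem_map.2 ⟨(leaf, vs), hpm, by simp⟩, ?_⟩
                  rw [hv] at h2; simp; omega
                · exact ⟨vs', List.mem_map.2 ⟨(k, vs'), hvs', by simp [hkl]⟩, h2⟩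
              · have h1 : 0 < vs.length := List.length_pos_of_ne_nil hvs
                refine ⟨vs ++ [acct], List.mem_map.2 ⟨(leaf, vs), hpm, by simp⟩, by simp; omega⟩
            · rintro ⟨vs', hm', h2⟩
              obtain ⟨q, hq, hfq⟩ := List.mem_map.1 hm'
              by_cases hkl : k = leaf
              · exact Or.inr hkl
              · left
                apply (hmem k).2
                by_cases hqk : q.1 = leaf
                · rw [if_pos (by simpa using hqk)] at hfq
                  exact absurd (congrArg Prod.fst hfq).symm hkl
                · rw [if_neg (by simpa using hqk)] at hfq
                  exact ⟨vs', hfq ▸ hq, h2⟩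
    · -- fresh leaf: both insert
      have hcg : g.contains leaf = false := by simpa using hc
      have hmcf : m.contains leaf = false := by rw [pv_contains_eq him]; exact hcg
      have hgd : g.getD leaf [] = [] := PySem.Dict.getD_of_not_contains g [] hcg
      rw [hgd]
      have hcond : (m.contains leaf && !(m.getD leaf "" == acct)) = false := by
        rw [hmcf]; simp
      have hnil : ¬ acct ∈ ([] : List String) := List.not_mem_nil
      rw [hcond, if_neg hnil]
      simp only [Bool.false_eq_true, if_false, List.nil_append]
      have hmi := PySem.Dict.items_insert_of_not_contains m acct hmcf
      have hgi := PySem.Dict.items_insert_of_not_contains g [acct] hcg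
      have hnotin : leaf ∉ g.keys := fun hmem' => by
        have h4 := (PySem.Dict.contains_iff_mem_keys g leaf).2 hmem'
        rw [hcg] at h4; exact Bool.false_ne_true h4
      refine ⟨?_, ?_, ?_, hdnd, ?_⟩
      · rw [hmi, hgi, List.map_append, him]; simp
      · intro p hp; rw [hgi] at hp
        rcases List.mem_append.1 hp with h1 | h1
        · exact hnev p h1
        · simp only [List.mem_singleton] at h1; rw [h1]; simp
      · rw [PySem.Dict.keys_insert_of_not_contains g [acct] hcg]
        rw [List.nodup_append]
        refine ⟨hnd, List.nodup_singleton _, ?_⟩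
        intro a ha b hb
        simp only [List.mem_singleton] at hb
        exact fun h => hnotin ((h.trans hb) ▸ ha)
      · intro k
        constructor
        · intro hk
          obtain ⟨vs', h1, h2⟩ := (hmem k).1 hk
          exact ⟨vs', by rw [hgi]; exact List.mem_append_left _ h1, h2⟩
        · rintro ⟨vs', h1, h2⟩
          rw [hgi] at h1
          rcases List.mem_append.1 h1 with h3 | h3
          · exact (hmem k).2 ⟨vs', h3, h2⟩
          · simp only [List.mem_singleton, Prod.mk.injEq] at h3
            rw [h3.2] at h2; norm_num at h2

theorem pvInv_init : pvInv PySem.Dict.empty PySem.Set.empty PySem.Dict.empty := by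
  refine ⟨rfl, by simp [PySem.Dict.empty], by simp [PySem.Dict.keys, PySem.Dict.empty],
    List.nodup_nil, ?_⟩
  intro k
  simp [PySem.Set.empty, PySem.Dict.empty]

theorem pvInv_fold (accounts : List String) (m d g) (h : pvInv m d g) :
    pvInv (accounts.foldl pvStepA (m, d)).1 (accounts.foldl pvStepA (m, d)).2
      (accounts.foldl pvStepB g) := by
  induction accounts generalizing m d g with
  | nil => exact h
  | cons a t ih =>
      have h1 := pvInv_step m d g a h
      simpa using ih (pvStepA (m, d) a).1 (pvStepA (m, d) a).2 (pvStepB g a) h1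

-- A's cleanup loop: popping every recorded duplicate is a filter on the items
theorem pv_erase_fold (ks : List String) (m : PySem.Dict String String) :
    (ks.foldl (fun m k => m.erase k) m).items
      = m.items.filter (fun p => !(ks.contains p.1)) := by
  induction ks generalizing m with
  | nil => simp
  | cons k t ih =>
      rw [List.foldl_cons, ih, PySem.Dict.erase]
      simp only [List.filter_filter]
      apply List.filter_congr
      intro p _
      by_cases h : p.1 = k <;> simp [Bool.and_comm, h]

-- B's classification loop, characterised on any prefix-closed accumulator
theorem pvClassify_fold (l : List (String × List String))
    (lm : PySem.Dict String String) (dups : List String)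
    (hfresh : ∀ p ∈ l, lm.contains p.1 = false) (hnd : (l.map (·.1)).Nodup) :
    (l.foldl pvClassify (lm, dups)).1.items
        = lm.items ++ (l.filter (fun p => p.2.length == 1)).map
            (fun p => (p.1, (PySem.List.pyGet? p.2 0).getD ""))
      ∧ (l.foldl pvClassify (lm, dups)).2
        = dups ++ (l.filter (fun p => !(p.2.length == 1))).map (·.1) := by
  induction l generalizing lm dups with
  | nil => simp
  | cons p t ih =>
      simp only [List.map_cons, List.nodup_cons] at hnd
      by_cases hlen : p.2.length == 1
      · have hstep : pvClassify (lm, dups) p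
            = (lm.insert p.1 ((PySem.List.pyGet? p.2 0).getD ""), dups) := by
          simp [pvClassify, hlen]
        have hfresh' : ∀ q ∈ t, (lm.insert p.1 ((PySem.List.pyGet? p.2 0).getD "")).contains q.1 = false := by
          intro q hq
          rw [PySem.Dict.contains_insert]
          have h1 : (q.1 == p.1) = false := by
            simp only [beq_eq_false_iff_ne]
            intro h
            exact hnd.1 (h ▸ List.mem_map_of_mem hq)
          rw [h1, hfresh q (List.mem_cons_of_mem p hq)]; rfl
        obtain ⟨ih1, ih2⟩ := ih _ _ hfresh' hnd.2
        rw [List.foldl_cons, hstep]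
        constructor
        · rw [ih1, PySem.Dict.items_insert_of_not_contains lm _ (hfresh p List.mem_cons_self)]
          simp [hlen]
        · rw [ih2]
          simp [hlen]
      · have hstep : pvClassify (lm, dups) p = (lm, dups ++ [p.1]) := by
          simp [pvClassify, hlen]
        obtain ⟨ih1, ih2⟩ := ih lm (dups ++ [p.1])
          (fun q hq => hfresh q (List.mem_cons_of_mem p hq)) hnd.2
        rw [List.foldl_cons, hstep]
        constructor
        · rw [ih1]; simp [hlen]
        · rw [ih2]; simp [hlen]

theorem pv_pyGet0 {vs : List String} (h : vs ≠ []) :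
    (PySem.List.pyGet? vs 0).getD "" = vs.headD "" := by
  cases vs with
  | nil => simp at h
  | cons a t => simp [PySem.List.pyGet?, PySem.List.pyIdx?]

theorem pv_agree : ∀ (accounts : List String),
    build_leaf_account_map accounts = build_leaf_account_map_alt accounts := by
  intro accounts
  unfold build_leaf_account_map build_leaf_account_map_alt
  have hInv := pvInv_fold accounts PySem.Dict.empty PySem.Set.empty PySem.Dict.empty pvInv_init
  set st := accounts.foldl pvStepA (PySem.Dict.empty, PySem.Set.empty) with hst
  set g := accounts.foldl pvStepB PySem.Dict.empty with hg
  obtain ⟨him, hnev, hnd, hdnd, hmem⟩ := hInv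
  have hndk : (g.items.map (·.1)).Nodup := hnd
  -- a leaf is recorded as duplicate exactly when its group holds ≥ 2 accounts
  have hd_mem : ∀ p ∈ g.items, (p.1 ∈ st.2 ↔ 2 ≤ p.2.length) := by
    intro p hp
    constructor
    · intro hk
      obtain ⟨vs, hv, h2⟩ := (hmem p.1).1 hk
      have e1 := PySem.Dict.get?_of_mem_items g hv hnd
      have e2 := PySem.Dict.get?_of_mem_items g (k := p.1) (v := p.2) (by simpa using hp) hnd
      rw [e1] at e2
      rwa [Option.some.inj e2] at h2
    · intro h2
      exact (hmem p.1).2 ⟨p.2, by simpa using hp, h2⟩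
  obtain ⟨hB1, hB2⟩ := pvClassify_fold g.items PySem.Dict.empty []
      (fun p _ => by simp [PySem.Dict.contains, PySem.Dict.empty]) hndk
  refine Prod.ext ?_ ?_
  · -- first component: the surviving leaf map
    show (List.foldl (fun m k => m.erase k) st.1 st.2).items
        = (List.foldl pvClassify (PySem.Dict.empty, []) g.items).1.items
    rw [pv_erase_fold, him, List.filter_map, hB1]
    have hpred : ∀ p ∈ g.items,
        ((fun q => !(List.contains st.2 q.1)) ∘ (fun p => (p.1, p.2.headD ""))) p
          = (p.2.length == 1) := by
      intro p hp
      have h1 : 0 < p.2.length := List.length_pos_of_ne_nil (hnev p hp)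
      by_cases h2 : 2 ≤ p.2.length
      · have hin : p.1 ∈ st.2 := (hd_mem p hp).2 h2
        have hc1 : List.contains st.2 p.1 = true := by simp [hin]
        simp only [Function.comp_apply, hc1, Bool.not_true]
        symm
        simp only [beq_eq_false_iff_ne]
        omega
      · have hnin : p.1 ∉ st.2 := fun hin => h2 ((hd_mem p hp).1 hin)
        have hc0 : List.contains st.2 p.1 = false := by simp [hnin]
        simp only [Function.comp_apply, hc0, Bool.not_false]
        symm
        simp only [beq_iff_eq]
        omega
    rw [List.filter_congr hpred]
    have hemp : PySem.Dict.empty.items = ([] : List (String × String)) := rfl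
    rw [hemp, List.nil_append]
    apply List.map_congr_left
    intro p hp
    rw [pv_pyGet0 (hnev p (List.mem_of_mem_filter hp))]
  · -- second component: the sorted duplicate leaves
    show PySem.List.sorted st.2 (fun x => x) false
        = PySem.List.sorted (List.foldl pvClassify (PySem.Dict.empty, []) g.items).2 (fun x => x) false
    rw [hB2, List.nil_append]
    apply PySem.List.sorted_eq_sorted_of_perm _ _ _ Function.injective_id
    have hndB : ((g.items.filter (fun p => !(p.2.length == 1))).map (·.1)).Nodup :=
      List.Nodup.sublist (List.Sublist.map _ List.filter_sublist) hndk
    rw [List.perm_ext_iff_of_nodup hdnd hndB]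
    intro k
    constructor
    · intro hk
      obtain ⟨vs, hv, h2⟩ := (hmem k).1 hk
      refine List.mem_map.2 ⟨(k, vs), List.mem_filter.2 ⟨hv, ?_⟩, rfl⟩
      simp only [Bool.not_eq_true', beq_eq_false_iff_ne]
      omega
    · intro hk
      obtain ⟨p, hpf, hpk⟩ := List.mem_map.1 hk
      obtain ⟨hpg, hq⟩ := List.mem_filter.1 hpf
      have h1 : 0 < p.2.length := List.length_pos_of_ne_nil (hnev p hpg)
      have hne1 : p.2.length ≠ 1 := by simpa using hq
      apply (hmem k).2
      refine ⟨p.2, ?_, by omega⟩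
      rw [← hpk]
      exact hpg

-- ===== VERDICT (by name: the statement is the Claim_ definition above) =====
theorem build_leaf_account_map_spec : Claim_equal_build_leaf_account_map := by
  intro accounts _
  show build_leaf_account_map accounts = build_leaf_account_map_alt accounts
  exact pv_agree accounts
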